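-- pv_equiv track=rewrite | github.com/datagero/adapters-efficiency-lane | cs_7643_efficiencylane/visualizations/utils_trainer_path.py | container_of_expected_runs
-- ===== SOURCE A (Python) =====
-- def container_of_expected_runs(dataset="citation_intent", version="v01", parallelism="1"):
--
--     bash_commands_dict = {
--         f"roberta-base_{dataset}_seq_bn_training_adapter_{version}": f"bash cs_7643_efficiencylane/utils/run_parallel_adapter.sh roberta-base {dataset} seq_bn adapter_default adapter_{version}",
--         f"roberta-base_{dataset}_double_seq_bn_training_adapter_{version}": f"bash cs_7643_efficiencylane/utils/run_parallel_adapter.sh roberta-base {dataset} double_seq_bn adapter_default adapter_{version}",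
--     }
--
--     if dataset in ['citation_intent', 'sciie']:
--         bash_commands_dict = {
--             f"roberta-base_{dataset}_training_model_{version}": f"bash cs_7643_efficiencylane/utils/run_parallel.sh roberta-base {dataset} finetuning model_{version}",
--             f"roberta-base_{dataset}_seq_bn_training_adapter_{version}": f"bash cs_7643_efficiencylane/utils/run_parallel_adapter.sh roberta-base {dataset} seq_bn adapter_default adapter_{version}",
--             f"roberta-base_{dataset}_double_seq_bn_training_adapter_{version}": f"bash cs_7643_efficiencylane/utils/run_parallel_adapter.sh roberta-base {dataset} double_seq_bn adapter_default adapter_{version}",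
--             f"cs_roberta_base_{dataset}_training_model_{version}": f"bash cs_7643_efficiencylane/utils/run_parallel.sh allenai/cs_roberta_base {dataset} finetuning model_{version}",
--             f"cs_roberta_base_{dataset}_seq_bn_training_adapter_{version}": f"bash cs_7643_efficiencylane/utils/run_parallel_adapter.sh allenai/cs_roberta_base {dataset} seq_bn adapter_default adapter_{version}",
--             f"cs_roberta_base_{dataset}_double_seq_bn_training_adapter_{version}": f"bash cs_7643_efficiencylane/utils/run_parallel_adapter.sh allenai/cs_roberta_base {dataset} double_seq_bn adapter_default adapter_{version}"
--         }
--
--         # The best adapters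
--         bash_commands_dict.update({
--             f"roberta-base_{dataset}_seq_bn_training_adapter_{version}_best": f"bash cs_7643_efficiencylane/utils/run_parallel_adapter.sh roberta-base {dataset} seq_bn roberta-base_{dataset}_seq_bn adapter_{version}_best",
--             f"roberta-base_{dataset}_double_seq_bn_training_adapter_{version}_best": f"bash cs_7643_efficiencylane/utils/run_parallel_adapter.sh roberta-base {dataset} double_seq_bn roberta-base_{dataset}_double_seq_bn adapter_{version}_best",
--             f"cs_roberta_base_{dataset}_seq_bn_training_adapter_{version}_best": f"bash cs_7643_efficiencylane/utils/run_parallel_adapter.sh allenai/cs_roberta_base {dataset} seq_bn cs_roberta_base_{dataset}_seq_bn adapter_{version}_best",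
--             f"cs_roberta_base_{dataset}_double_seq_bn_training_adapter_{version}_best": f"bash cs_7643_efficiencylane/utils/run_parallel_adapter.sh allenai/cs_roberta_base {dataset} double_seq_bn cs_roberta_base_{dataset}_double_seq_bn adapter_{version}_best"
--         })
--
--         if dataset == 'citation_intent':
--             bash_commands_dict.update({
--                 f"mlm_model_{dataset}_training_model_{version}": f"bash cs_7643_efficiencylane/utils/run_parallel.sh ./mlm_model {dataset} finetuning model_{version}",
--                 f"dsp_roberta_base_tapt_citation_intent_1688_{dataset}_training_model_{version}": f"bash cs_7643_efficiencylane/utils/run_parallel.sh allenai/dsp_roberta_base_tapt_citation_intent_1688 {dataset} finetuning model_{version}",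
--                 f"dsp_roberta_base_tapt_citation_intent_1688_{dataset}_seq_bn_training_adapter_{version}": f"bash cs_7643_efficiencylane/utils/run_parallel_adapter.sh allenai/dsp_roberta_base_tapt_citation_intent_1688 {dataset} seq_bn adapter_default adapter_{version}",
--                 f"dsp_roberta_base_tapt_citation_intent_1688_{dataset}_double_seq_bn_training_adapter_{version}": f"bash cs_7643_efficiencylane/utils/run_parallel_adapter.sh allenai/dsp_roberta_base_tapt_citation_intent_1688 {dataset} double_seq_bn adapter_default adapter_{version}",
--                 f"dsp_roberta_base_dapt_cs_tapt_citation_intent_1688_{dataset}_training_model_{version}": f"bash cs_7643_efficiencylane/utils/run_parallel.sh allenai/dsp_roberta_base_dapt_cs_tapt_citation_intent_1688 {dataset} finetuning model_{version}",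
--                 f"dsp_roberta_base_dapt_cs_tapt_citation_intent_1688_{dataset}_seq_bn_training_adapter_{version}": f"bash cs_7643_efficiencylane/utils/run_parallel_adapter.sh allenai/dsp_roberta_base_dapt_cs_tapt_citation_intent_1688 {dataset} seq_bn adapter_default adapter_{version}",
--                 f"dsp_roberta_base_dapt_cs_tapt_citation_intent_1688_{dataset}_double_seq_bn_training_adapter_{version}": f"bash cs_7643_efficiencylane/utils/run_parallel_adapter.sh allenai/dsp_roberta_base_dapt_cs_tapt_citation_intent_1688 {dataset} double_seq_bn adapter_default adapter_{version}"
--             })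
--         if dataset == 'sciie':
--             bash_commands_dict.update({
--                 f"dsp_roberta_base_tapt_sciie_3219_{dataset}_training_model_{version}": f"bash cs_7643_efficiencylane/utils/run_parallel.sh allenai/dsp_roberta_base_tapt_sciie_3219 {dataset} finetuning model_{version}",
--                 f"dsp_roberta_base_tapt_sciie_3219_{dataset}_seq_bn_training_adapter_{version}": f"bash cs_7643_efficiencylane/utils/run_parallel_adapter.sh allenai/dsp_roberta_base_tapt_sciie_3219 {dataset} seq_bn adapter_default adapter_{version}",
--                 f"dsp_roberta_base_tapt_sciie_3219_{dataset}_double_seq_bn_training_adapter_{version}": f"bash cs_7643_efficiencylane/utils/run_parallel_adapter.sh allenai/dsp_roberta_base_tapt_sciie_3219 {dataset} double_seq_bn adapter_default adapter_{version}",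
--                 f"dsp_roberta_base_dapt_cs_tapt_sciie_3219_{dataset}_training_model_{version}": f"bash cs_7643_efficiencylane/utils/run_parallel.sh allenai/dsp_roberta_base_dapt_cs_tapt_sciie_3219 {dataset} finetuning model_{version}",
--                 f"dsp_roberta_base_dapt_cs_tapt_sciie_3219_{dataset}_seq_bn_training_adapter_{version}": f"bash cs_7643_efficiencylane/utils/run_parallel_adapter.sh allenai/dsp_roberta_base_dapt_cs_tapt_sciie_3219 {dataset} seq_bn adapter_default adapter_{version}",
--                 f"dsp_roberta_base_dapt_cs_tapt_sciie_3219_{dataset}_double_seq_bn_training_adapter_{version}": f"bash cs_7643_efficiencylane/utils/run_parallel_adapter.sh allenai/dsp_roberta_base_dapt_cs_tapt_sciie_3219 {dataset} double_seq_bn adapter_default adapter_{version}"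
--             })
--
--     if dataset in ['hyperpartisan_news', 'ag']:
--
--         bash_commands_dict.update({
--             f"news_roberta_base_{dataset}_training_model_{version}": f"bash cs_7643_efficiencylane/utils/run_parallel.sh allenai/news_roberta_base {dataset} finetuning model_{version}",
--             f"news_roberta_base_{dataset}_seq_bn_training_adapter_{version}": f"bash cs_7643_efficiencylane/utils/run_parallel_adapter.sh allenai/news_roberta_base {dataset} seq_bn adapter_default adapter_{version}",
--             f"news_roberta_base_{dataset}_double_seq_bn_training_adapter_{version}": f"bash cs_7643_efficiencylane/utils/run_parallel_adapter.sh allenai/news_roberta_base {dataset} double_seq_bn adapter_default adapter_{version}",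
--         })
--
--         if dataset in ['hyperpartisan_news']:
--             bash_commands_dict.update({
--                 f"roberta-base_{dataset}_training_model_{version}": f"bash cs_7643_efficiencylane/utils/run_parallel.sh roberta-base {dataset} finetuning model_{version}"
--             })
--
--     if dataset in ['amazon', 'imdb']:
--
--         bash_commands_dict.update({
--             f"reviews_roberta_base_{dataset}_training_model_{version}": f"bash cs_7643_efficiencylane/utils/run_parallel.sh allenai/reviews_roberta_base {dataset} finetuning model_{version}",
--             f"reviews_roberta_base_{dataset}_seq_bn_training_adapter_{version}": f"bash cs_7643_efficiencylane/utils/run_parallel_adapter.sh allenai/reviews_roberta_base {dataset} seq_bn adapter_default adapter_{version}",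
--             f"reviews_roberta_base_{dataset}_double_seq_bn_training_adapter_{version}": f"bash cs_7643_efficiencylane/utils/run_parallel_adapter.sh allenai/reviews_roberta_base {dataset} double_seq_bn adapter_default adapter_{version}",
--         })
--
--     if dataset in ['chemprot', 'rct-20k']:
--         # Need to overwrite base training as it requires different config as it maximises micro-f1 instead of macro-f1
--         bash_commands_dict.update({
--             f"roberta-base_{dataset}_training_model_{version}": f"bash cs_7643_efficiencylane/utils/run_parallel.sh roberta-base {dataset} finetuning_biomed model_{version}",
--             f"biomed_roberta_base_{dataset}_training_model_{version}": f"bash cs_7643_efficiencylane/utils/run_parallel.sh allenai/biomed_roberta_base {dataset} finetuning_biomed model_{version}",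
--             f"roberta-base_{dataset}_seq_bn_training_adapter_{version}": f"bash cs_7643_efficiencylane/utils/run_parallel_adapter.sh roberta-base {dataset} seq_bn adapter_biomed adapter_{version}",
--             f"roberta-base_{dataset}_double_seq_bn_training_adapter_{version}": f"bash cs_7643_efficiencylane/utils/run_parallel_adapter.sh roberta-base {dataset} double_seq_bn adapter_biomed adapter_{version}",
--             f"biomed_roberta_base_{dataset}_seq_bn_training_adapter_{version}": f"bash cs_7643_efficiencylane/utils/run_parallel_adapter.sh allenai/biomed_roberta_base {dataset} seq_bn adapter_biomed adapter_{version}",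
--             f"biomed_roberta_base_{dataset}_double_seq_bn_training_adapter_{version}": f"bash cs_7643_efficiencylane/utils/run_parallel_adapter.sh allenai/biomed_roberta_base {dataset} double_seq_bn adapter_biomed adapter_{version}",
--         })
--
--         if dataset in ['chemprot']:
--             bash_commands_dict.update({
--                 f"dsp_roberta_base_tapt_chemprot_4169_{dataset}_training_model_{version}": f"bash cs_7643_efficiencylane/utils/run_parallel.sh allenai/dsp_roberta_base_tapt_chemprot_4169 {dataset} finetuning_biomed model_{version}",
--                 f"dsp_roberta_base_dapt_biomed_tapt_chemprot_4169_{dataset}_training_model_{version}": f"bash cs_7643_efficiencylane/utils/run_parallel.sh allenai/dsp_roberta_base_dapt_biomed_tapt_chemprot_4169 {dataset} finetuning_biomed model_{version}",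
--                 f"dsp_roberta_base_tapt_chemprot_4169_{dataset}_seq_bn_training_adapter_{version}": f"bash cs_7643_efficiencylane/utils/run_parallel_adapter.sh allenai/dsp_roberta_base_tapt_chemprot_4169 {dataset} seq_bn adapter_biomed adapter_{version}",
--                 f"dsp_roberta_base_tapt_chemprot_4169_{dataset}_double_seq_bn_training_adapter_{version}": f"bash cs_7643_efficiencylane/utils/run_parallel_adapter.sh allenai/dsp_roberta_base_tapt_chemprot_4169 {dataset} double_seq_bn adapter_biomed adapter_{version}",
--                 f"dsp_roberta_base_dapt_biomed_tapt_chemprot_4169_{dataset}_seq_bn_training_adapter_{version}": f"bash cs_7643_efficiencylane/utils/run_parallel_adapter.sh allenai/dsp_roberta_base_dapt_biomed_tapt_chemprot_4169 {dataset} seq_bn adapter_biomed adapter_{version}",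
--                 f"dsp_roberta_base_dapt_biomed_tapt_chemprot_4169_{dataset}_double_seq_bn_training_adapter_{version}": f"bash cs_7643_efficiencylane/utils/run_parallel_adapter.sh allenai/dsp_roberta_base_dapt_biomed_tapt_chemprot_4169 {dataset} double_seq_bn adapter_biomed adapter_{version}",
--             })
--
--     for study, command in bash_commands_dict.items():
--         bash_commands_dict[study] = bash_commands_dict[study] + f" {parallelism}"
--
--     return bash_commands_dict
-- ===== SOURCE B (Python) =====
-- # B: the function is a pure render of a per-dataset PLAN -- an ordered list of
-- # run specs ("model"/"adapter"/"best" records) fully resolved up front (the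
-- # chemprot/rct-20k biomed override is already folded into the plan, keeping the
-- # original key positions) -- rendered to (key, command) in one comprehension
-- # that appends the parallelism; no dict literals, no update()/reassignment
-- # sequence, no final rewrite loop.
--
-- _RB = ("roberta-base", "roberta-base")
-- _CS = ("cs_roberta_base", "allenai/cs_roberta_base")
--
--
-- def _plan(ds):
--     # each spec: ("model", short, full, cfg) | ("adapter", short, full, arch, cfg)
--     #          | ("best", short, full, arch)
--     def model(sf, cfg="finetuning"):
--         return [("model", sf[0], sf[1], cfg)]
--
--     def adapters(sf, cfg="adapter_default"):
--         return [("adapter", sf[0], sf[1], arch, cfg)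
--                 for arch in ("seq_bn", "double_seq_bn")]
--
--     def allen(name):
--         return (name, "allenai/" + name)
--
--     if ds in ("citation_intent", "sciie"):
--         tag = "tapt_citation_intent_1688" if ds == "citation_intent" else "tapt_sciie_3219"
--         plan = []
--         for sf in (_RB, _CS):
--             plan += model(sf) + adapters(sf)
--         for sf in (_RB, _CS):
--             plan += [("best", sf[0], sf[1], arch) for arch in ("seq_bn", "double_seq_bn")]
--         if ds == "citation_intent":
--             plan += model(("mlm_model", "./mlm_model"))
--         for pre in (allen("dsp_roberta_base_" + tag), allen("dsp_roberta_base_dapt_cs_" + tag)):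
--             plan += model(pre) + adapters(pre)
--         return plan
--
--     if ds in ("chemprot", "rct-20k"):
--         # biomed override already resolved: base adapter slots keep first position
--         plan = (adapters(_RB, "adapter_biomed")
--                 + model(_RB, "finetuning_biomed")
--                 + model(allen("biomed_roberta_base"), "finetuning_biomed")
--                 + adapters(allen("biomed_roberta_base"), "adapter_biomed"))
--         if ds == "chemprot":
--             pres = (allen("dsp_roberta_base_tapt_chemprot_4169"),
--                     allen("dsp_roberta_base_dapt_biomed_tapt_chemprot_4169"))
--             for pre in pres:
--                 plan += model(pre, "finetuning_biomed")
--             for pre in pres: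
--                 plan += adapters(pre, "adapter_biomed")
--         return plan
--
--     plan = adapters(_RB)
--     if ds in ("hyperpartisan_news", "ag"):
--         plan += model(allen("news_roberta_base")) + adapters(allen("news_roberta_base"))
--         if ds == "hyperpartisan_news":
--             plan += model(_RB)
--     if ds in ("amazon", "imdb"):
--         plan += model(allen("reviews_roberta_base")) + adapters(allen("reviews_roberta_base"))
--     return plan
--
--
-- def _render(spec, ds, v):
--     kind, short, full = spec[0], spec[1], spec[2]
--     if kind == "model":
--         return (f"{short}_{ds}_training_model_{v}",
--                 f"bash cs_7643_efficiencylane/utils/run_parallel.sh {full} {ds} {spec[3]} model_{v}")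
--     if kind == "adapter":
--         arch, cfg = spec[3], spec[4]
--         return (f"{short}_{ds}_{arch}_training_adapter_{v}",
--                 f"bash cs_7643_efficiencylane/utils/run_parallel_adapter.sh {full} {ds} {arch} {cfg} adapter_{v}")
--     arch = spec[3]
--     return (f"{short}_{ds}_{arch}_training_adapter_{v}_best",
--             f"bash cs_7643_efficiencylane/utils/run_parallel_adapter.sh {full} {ds} {arch} {short}_{ds}_{arch} adapter_{v}_best")
--
--
-- def container_of_expected_runs(dataset="citation_intent", version="v01", parallelism="1"):
--     return {key: f"{cmd} {parallelism}"
--             for key, cmd in (_render(s, dataset, version) for s in _plan(dataset))}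
-- ===== Notes on version B (the rewrite author's own statement) =====
-- stated objective: simpler
-- what changed: B replaces A's hardcoded dict literals mutated by successive update() calls plus a final value-rewrite loop with a declarative plan: _plan(dataset) returns the fully resolved ordered list of run-spec records (the chemprot/rct-20k biomed override is already folded into the plan, keeping key positions), and one comprehension renders each spec to its key and command with the parallelism appended.
import Mathlib
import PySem

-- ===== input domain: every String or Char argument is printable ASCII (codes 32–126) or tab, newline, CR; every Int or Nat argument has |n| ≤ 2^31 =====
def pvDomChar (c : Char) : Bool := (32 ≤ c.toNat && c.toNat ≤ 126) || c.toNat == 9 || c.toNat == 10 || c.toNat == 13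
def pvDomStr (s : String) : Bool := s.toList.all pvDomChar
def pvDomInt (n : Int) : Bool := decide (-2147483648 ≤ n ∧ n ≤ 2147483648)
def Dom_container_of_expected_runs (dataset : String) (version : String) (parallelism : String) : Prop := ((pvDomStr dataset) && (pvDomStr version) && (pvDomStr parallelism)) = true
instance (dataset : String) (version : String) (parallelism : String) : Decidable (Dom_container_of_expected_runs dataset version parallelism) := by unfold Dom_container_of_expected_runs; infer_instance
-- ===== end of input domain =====

-- B is a pure render of a per-dataset PLAN (an ordered list of run-spec records, with the
-- chemprot/rct-20k override already resolved) instead of A's dict literals mutated by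
-- update() calls plus a final rewrite loop; objective: simpler.

-- ===== PORT A =====
-- A's dict building, one named stage per source if-block (branches and entries in source order)

def pvDictBase (dataset : String) (version : String) : PySem.Dict String String :=
  PySem.Dict.ofList [
("roberta-base_" ++ dataset ++ "_seq_bn_training_adapter_" ++ version,
     "bash cs_7643_efficiencylane/utils/run_parallel_adapter.sh roberta-base " ++ dataset ++ " seq_bn adapter_default adapter_" ++ version),
    ("roberta-base_" ++ dataset ++ "_double_seq_bn_training_adapter_" ++ version,
     "bash cs_7643_efficiencylane/utils/run_parallel_adapter.sh roberta-base " ++ dataset ++ " double_seq_bn adapter_default adapter_" ++ version)]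

-- if dataset in ['citation_intent', 'sciie']: (dict literal, .update best, per-dataset .update)
def pvDictBlock1 (dataset : String) (version : String) (d : PySem.Dict String String) : PySem.Dict String String :=
  if dataset ∈ ["citation_intent", "sciie"] then
    let d : PySem.Dict String String := PySem.Dict.ofList [
    ("roberta-base_" ++ dataset ++ "_training_model_" ++ version,
     "bash cs_7643_efficiencylane/utils/run_parallel.sh roberta-base " ++ dataset ++ " finetuning model_" ++ version),
    ("roberta-base_" ++ dataset ++ "_seq_bn_training_adapter_" ++ version,
     "bash cs_7643_efficiencylane/utils/run_parallel_adapter.sh roberta-base " ++ dataset ++ " seq_bn adapter_default adapter_" ++ version),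
    ("roberta-base_" ++ dataset ++ "_double_seq_bn_training_adapter_" ++ version,
     "bash cs_7643_efficiencylane/utils/run_parallel_adapter.sh roberta-base " ++ dataset ++ " double_seq_bn adapter_default adapter_" ++ version),
    ("cs_roberta_base_" ++ dataset ++ "_training_model_" ++ version,
     "bash cs_7643_efficiencylane/utils/run_parallel.sh allenai/cs_roberta_base " ++ dataset ++ " finetuning model_" ++ version),
    ("cs_roberta_base_" ++ dataset ++ "_seq_bn_training_adapter_" ++ version,
     "bash cs_7643_efficiencylane/utils/run_parallel_adapter.sh allenai/cs_roberta_base " ++ dataset ++ " seq_bn adapter_default adapter_" ++ version),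
    ("cs_roberta_base_" ++ dataset ++ "_double_seq_bn_training_adapter_" ++ version,
     "bash cs_7643_efficiencylane/utils/run_parallel_adapter.sh allenai/cs_roberta_base " ++ dataset ++ " double_seq_bn adapter_default adapter_" ++ version)]
    let d := d.update [
    ("roberta-base_" ++ dataset ++ "_seq_bn_training_adapter_" ++ version ++ "_best",
     "bash cs_7643_efficiencylane/utils/run_parallel_adapter.sh roberta-base " ++ dataset ++ " seq_bn roberta-base_" ++ dataset ++ "_seq_bn adapter_" ++ version ++ "_best"),
    ("roberta-base_" ++ dataset ++ "_double_seq_bn_training_adapter_" ++ version ++ "_best",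
     "bash cs_7643_efficiencylane/utils/run_parallel_adapter.sh roberta-base " ++ dataset ++ " double_seq_bn roberta-base_" ++ dataset ++ "_double_seq_bn adapter_" ++ version ++ "_best"),
    ("cs_roberta_base_" ++ dataset ++ "_seq_bn_training_adapter_" ++ version ++ "_best",
     "bash cs_7643_efficiencylane/utils/run_parallel_adapter.sh allenai/cs_roberta_base " ++ dataset ++ " seq_bn cs_roberta_base_" ++ dataset ++ "_seq_bn adapter_" ++ version ++ "_best"),
    ("cs_roberta_base_" ++ dataset ++ "_double_seq_bn_training_adapter_" ++ version ++ "_best",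
     "bash cs_7643_efficiencylane/utils/run_parallel_adapter.sh allenai/cs_roberta_base " ++ dataset ++ " double_seq_bn cs_roberta_base_" ++ dataset ++ "_double_seq_bn adapter_" ++ version ++ "_best")]
    let d := if dataset = "citation_intent" then d.update [
    ("mlm_model_" ++ dataset ++ "_training_model_" ++ version,
     "bash cs_7643_efficiencylane/utils/run_parallel.sh ./mlm_model " ++ dataset ++ " finetuning model_" ++ version),
    ("dsp_roberta_base_tapt_citation_intent_1688_" ++ dataset ++ "_training_model_" ++ version,
     "bash cs_7643_efficiencylane/utils/run_parallel.sh allenai/dsp_roberta_base_tapt_citation_intent_1688 " ++ dataset ++ " finetuning model_" ++ version),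
    ("dsp_roberta_base_tapt_citation_intent_1688_" ++ dataset ++ "_seq_bn_training_adapter_" ++ version,
     "bash cs_7643_efficiencylane/utils/run_parallel_adapter.sh allenai/dsp_roberta_base_tapt_citation_intent_1688 " ++ dataset ++ " seq_bn adapter_default adapter_" ++ version),
    ("dsp_roberta_base_tapt_citation_intent_1688_" ++ dataset ++ "_double_seq_bn_training_adapter_" ++ version,
     "bash cs_7643_efficiencylane/utils/run_parallel_adapter.sh allenai/dsp_roberta_base_tapt_citation_intent_1688 " ++ dataset ++ " double_seq_bn adapter_default adapter_" ++ version),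
    ("dsp_roberta_base_dapt_cs_tapt_citation_intent_1688_" ++ dataset ++ "_training_model_" ++ version,
     "bash cs_7643_efficiencylane/utils/run_parallel.sh allenai/dsp_roberta_base_dapt_cs_tapt_citation_intent_1688 " ++ dataset ++ " finetuning model_" ++ version),
    ("dsp_roberta_base_dapt_cs_tapt_citation_intent_1688_" ++ dataset ++ "_seq_bn_training_adapter_" ++ version,
     "bash cs_7643_efficiencylane/utils/run_parallel_adapter.sh allenai/dsp_roberta_base_dapt_cs_tapt_citation_intent_1688 " ++ dataset ++ " seq_bn adapter_default adapter_" ++ version),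
    ("dsp_roberta_base_dapt_cs_tapt_citation_intent_1688_" ++ dataset ++ "_double_seq_bn_training_adapter_" ++ version,
     "bash cs_7643_efficiencylane/utils/run_parallel_adapter.sh allenai/dsp_roberta_base_dapt_cs_tapt_citation_intent_1688 " ++ dataset ++ " double_seq_bn adapter_default adapter_" ++ version)] else d
    let d := if dataset = "sciie" then d.update [
    ("dsp_roberta_base_tapt_sciie_3219_" ++ dataset ++ "_training_model_" ++ version,
     "bash cs_7643_efficiencylane/utils/run_parallel.sh allenai/dsp_roberta_base_tapt_sciie_3219 " ++ dataset ++ " finetuning model_" ++ version),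
    ("dsp_roberta_base_tapt_sciie_3219_" ++ dataset ++ "_seq_bn_training_adapter_" ++ version,
     "bash cs_7643_efficiencylane/utils/run_parallel_adapter.sh allenai/dsp_roberta_base_tapt_sciie_3219 " ++ dataset ++ " seq_bn adapter_default adapter_" ++ version),
    ("dsp_roberta_base_tapt_sciie_3219_" ++ dataset ++ "_double_seq_bn_training_adapter_" ++ version,
     "bash cs_7643_efficiencylane/utils/run_parallel_adapter.sh allenai/dsp_roberta_base_tapt_sciie_3219 " ++ dataset ++ " double_seq_bn adapter_default adapter_" ++ version),
    ("dsp_roberta_base_dapt_cs_tapt_sciie_3219_" ++ dataset ++ "_training_model_" ++ version,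
     "bash cs_7643_efficiencylane/utils/run_parallel.sh allenai/dsp_roberta_base_dapt_cs_tapt_sciie_3219 " ++ dataset ++ " finetuning model_" ++ version),
    ("dsp_roberta_base_dapt_cs_tapt_sciie_3219_" ++ dataset ++ "_seq_bn_training_adapter_" ++ version,
     "bash cs_7643_efficiencylane/utils/run_parallel_adapter.sh allenai/dsp_roberta_base_dapt_cs_tapt_sciie_3219 " ++ dataset ++ " seq_bn adapter_default adapter_" ++ version),
    ("dsp_roberta_base_dapt_cs_tapt_sciie_3219_" ++ dataset ++ "_double_seq_bn_training_adapter_" ++ version,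
     "bash cs_7643_efficiencylane/utils/run_parallel_adapter.sh allenai/dsp_roberta_base_dapt_cs_tapt_sciie_3219 " ++ dataset ++ " double_seq_bn adapter_default adapter_" ++ version)] else d
    d
  else d

-- if dataset in ['hyperpartisan_news', 'ag']:
def pvDictBlock2 (dataset : String) (version : String) (d : PySem.Dict String String) : PySem.Dict String String :=
  if dataset ∈ ["hyperpartisan_news", "ag"] then
    let d := d.update [
    ("news_roberta_base_" ++ dataset ++ "_training_model_" ++ version,
     "bash cs_7643_efficiencylane/utils/run_parallel.sh allenai/news_roberta_base " ++ dataset ++ " finetuning model_" ++ version),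
    ("news_roberta_base_" ++ dataset ++ "_seq_bn_training_adapter_" ++ version,
     "bash cs_7643_efficiencylane/utils/run_parallel_adapter.sh allenai/news_roberta_base " ++ dataset ++ " seq_bn adapter_default adapter_" ++ version),
    ("news_roberta_base_" ++ dataset ++ "_double_seq_bn_training_adapter_" ++ version,
     "bash cs_7643_efficiencylane/utils/run_parallel_adapter.sh allenai/news_roberta_base " ++ dataset ++ " double_seq_bn adapter_default adapter_" ++ version)]
    let d := if dataset ∈ (["hyperpartisan_news"] : List String) then d.update [
    ("roberta-base_" ++ dataset ++ "_training_model_" ++ version,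
     "bash cs_7643_efficiencylane/utils/run_parallel.sh roberta-base " ++ dataset ++ " finetuning model_" ++ version)] else d
    d
  else d

-- if dataset in ['amazon', 'imdb']:
def pvDictBlock3 (dataset : String) (version : String) (d : PySem.Dict String String) : PySem.Dict String String :=
  if dataset ∈ ["amazon", "imdb"] then d.update [
    ("reviews_roberta_base_" ++ dataset ++ "_training_model_" ++ version,
     "bash cs_7643_efficiencylane/utils/run_parallel.sh allenai/reviews_roberta_base " ++ dataset ++ " finetuning model_" ++ version),
    ("reviews_roberta_base_" ++ dataset ++ "_seq_bn_training_adapter_" ++ version,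
     "bash cs_7643_efficiencylane/utils/run_parallel_adapter.sh allenai/reviews_roberta_base " ++ dataset ++ " seq_bn adapter_default adapter_" ++ version),
    ("reviews_roberta_base_" ++ dataset ++ "_double_seq_bn_training_adapter_" ++ version,
     "bash cs_7643_efficiencylane/utils/run_parallel_adapter.sh allenai/reviews_roberta_base " ++ dataset ++ " double_seq_bn adapter_default adapter_" ++ version)] else d

-- if dataset in ['chemprot', 'rct-20k']:
def pvDictBlock4 (dataset : String) (version : String) (d : PySem.Dict String String) : PySem.Dict String String :=
  if dataset ∈ ["chemprot", "rct-20k"] then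
    let d := d.update [
    ("roberta-base_" ++ dataset ++ "_training_model_" ++ version,
     "bash cs_7643_efficiencylane/utils/run_parallel.sh roberta-base " ++ dataset ++ " finetuning_biomed model_" ++ version),
    ("biomed_roberta_base_" ++ dataset ++ "_training_model_" ++ version,
     "bash cs_7643_efficiencylane/utils/run_parallel.sh allenai/biomed_roberta_base " ++ dataset ++ " finetuning_biomed model_" ++ version),
    ("roberta-base_" ++ dataset ++ "_seq_bn_training_adapter_" ++ version,
     "bash cs_7643_efficiencylane/utils/run_parallel_adapter.sh roberta-base " ++ dataset ++ " seq_bn adapter_biomed adapter_" ++ version),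
    ("roberta-base_" ++ dataset ++ "_double_seq_bn_training_adapter_" ++ version,
     "bash cs_7643_efficiencylane/utils/run_parallel_adapter.sh roberta-base " ++ dataset ++ " double_seq_bn adapter_biomed adapter_" ++ version),
    ("biomed_roberta_base_" ++ dataset ++ "_seq_bn_training_adapter_" ++ version,
     "bash cs_7643_efficiencylane/utils/run_parallel_adapter.sh allenai/biomed_roberta_base " ++ dataset ++ " seq_bn adapter_biomed adapter_" ++ version),
    ("biomed_roberta_base_" ++ dataset ++ "_double_seq_bn_training_adapter_" ++ version,
     "bash cs_7643_efficiencylane/utils/run_parallel_adapter.sh allenai/biomed_roberta_base " ++ dataset ++ " double_seq_bn adapter_biomed adapter_" ++ version)]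
    let d := if dataset ∈ (["chemprot"] : List String) then d.update [
    ("dsp_roberta_base_tapt_chemprot_4169_" ++ dataset ++ "_training_model_" ++ version,
     "bash cs_7643_efficiencylane/utils/run_parallel.sh allenai/dsp_roberta_base_tapt_chemprot_4169 " ++ dataset ++ " finetuning_biomed model_" ++ version),
    ("dsp_roberta_base_dapt_biomed_tapt_chemprot_4169_" ++ dataset ++ "_training_model_" ++ version,
     "bash cs_7643_efficiencylane/utils/run_parallel.sh allenai/dsp_roberta_base_dapt_biomed_tapt_chemprot_4169 " ++ dataset ++ " finetuning_biomed model_" ++ version),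
    ("dsp_roberta_base_tapt_chemprot_4169_" ++ dataset ++ "_seq_bn_training_adapter_" ++ version,
     "bash cs_7643_efficiencylane/utils/run_parallel_adapter.sh allenai/dsp_roberta_base_tapt_chemprot_4169 " ++ dataset ++ " seq_bn adapter_biomed adapter_" ++ version),
    ("dsp_roberta_base_tapt_chemprot_4169_" ++ dataset ++ "_double_seq_bn_training_adapter_" ++ version,
     "bash cs_7643_efficiencylane/utils/run_parallel_adapter.sh allenai/dsp_roberta_base_tapt_chemprot_4169 " ++ dataset ++ " double_seq_bn adapter_biomed adapter_" ++ version),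
    ("dsp_roberta_base_dapt_biomed_tapt_chemprot_4169_" ++ dataset ++ "_seq_bn_training_adapter_" ++ version,
     "bash cs_7643_efficiencylane/utils/run_parallel_adapter.sh allenai/dsp_roberta_base_dapt_biomed_tapt_chemprot_4169 " ++ dataset ++ " seq_bn adapter_biomed adapter_" ++ version),
    ("dsp_roberta_base_dapt_biomed_tapt_chemprot_4169_" ++ dataset ++ "_double_seq_bn_training_adapter_" ++ version,
     "bash cs_7643_efficiencylane/utils/run_parallel_adapter.sh allenai/dsp_roberta_base_dapt_biomed_tapt_chemprot_4169 " ++ dataset ++ " double_seq_bn adapter_biomed adapter_" ++ version)] else d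
    d
  else d

-- A's final loop: for study, command in d.items(): d[study] = d[study] + f" {parallelism}"
def pvAppendParallelism (d : PySem.Dict String String) (parallelism : String) : List (String × String) :=
  (d.items.foldl (fun dd kv => dd.modify kv.1 "" (fun c => c ++ (" " ++ parallelism))) d).items

def container_of_expected_runs (dataset : String) (version : String) (parallelism : String) : List (String × String) :=
  pvAppendParallelism
    (pvDictBlock4 dataset version (pvDictBlock3 dataset version
      (pvDictBlock2 dataset version (pvDictBlock1 dataset version (pvDictBase dataset version)))))
    parallelism

-- ===== PORT B =====
-- Source B: each run is a spec record; _plan(ds) is the fully resolved ordered plan; _render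
-- turns a spec into (key, command); the dict is one comprehension over the rendered plan.

inductive PvSpec where
  | model (short full cfg : String)
  | adapter (short full arch cfg : String)
  | best (short full arch : String)
deriving DecidableEq, Repr

def pvRB : String × String := ("roberta-base", "roberta-base")
def pvCS : String × String := ("cs_roberta_base", "allenai/cs_roberta_base")

-- Source B _plan's local helpers model / adapters / allen
def pvSpecModel (sf : String × String) (cfg : String) : List PvSpec := [PvSpec.model sf.1 sf.2 cfg]

def pvSpecAdapters (sf : String × String) (cfg : String) : List PvSpec :=
  ["seq_bn", "double_seq_bn"].map (fun arch => PvSpec.adapter sf.1 sf.2 arch cfg)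

def pvAllen (name : String) : String × String := (name, "allenai/" ++ name)

def pvPlan (ds : String) : List PvSpec :=
  if ds ∈ ["citation_intent", "sciie"] then
    let tag := if ds = "citation_intent" then "tapt_citation_intent_1688" else "tapt_sciie_3219"
    let plan := [pvRB, pvCS].foldl
      (fun pl sf => pl ++ pvSpecModel sf "finetuning" ++ pvSpecAdapters sf "adapter_default") []
    let plan := [pvRB, pvCS].foldl
      (fun pl sf => pl ++ ["seq_bn", "double_seq_bn"].map (fun arch => PvSpec.best sf.1 sf.2 arch)) plan
    let plan := if ds = "citation_intent"
      then plan ++ pvSpecModel ("mlm_model", "./mlm_model") "finetuning" else plan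
    [pvAllen ("dsp_roberta_base_" ++ tag), pvAllen ("dsp_roberta_base_dapt_cs_" ++ tag)].foldl
      (fun pl pre => pl ++ pvSpecModel pre "finetuning" ++ pvSpecAdapters pre "adapter_default") plan
  else if ds ∈ ["chemprot", "rct-20k"] then
    -- biomed override already resolved: base adapter slots keep first position
    let plan := pvSpecAdapters pvRB "adapter_biomed" ++ pvSpecModel pvRB "finetuning_biomed"
      ++ pvSpecModel (pvAllen "biomed_roberta_base") "finetuning_biomed"
      ++ pvSpecAdapters (pvAllen "biomed_roberta_base") "adapter_biomed"
    if ds = "chemprot" then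
      let pres := [pvAllen "dsp_roberta_base_tapt_chemprot_4169",
                   pvAllen "dsp_roberta_base_dapt_biomed_tapt_chemprot_4169"]
      pres.foldl (fun pl pre => pl ++ pvSpecAdapters pre "adapter_biomed")
        (pres.foldl (fun pl pre => pl ++ pvSpecModel pre "finetuning_biomed") plan)
    else plan
  else
    let plan := pvSpecAdapters pvRB "adapter_default"
    let plan := if ds ∈ ["hyperpartisan_news", "ag"] then
        let p2 := plan ++ pvSpecModel (pvAllen "news_roberta_base") "finetuning"
          ++ pvSpecAdapters (pvAllen "news_roberta_base") "adapter_default"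
        if ds = "hyperpartisan_news" then p2 ++ pvSpecModel pvRB "finetuning" else p2
      else plan
    if ds ∈ ["amazon", "imdb"] then
      plan ++ pvSpecModel (pvAllen "reviews_roberta_base") "finetuning"
        ++ pvSpecAdapters (pvAllen "reviews_roberta_base") "adapter_default"
    else plan

def pvRender (spec : PvSpec) (ds v : String) : String × String :=
  match spec with
  | .model short full cfg =>
      (short ++ "_" ++ ds ++ "_training_model_" ++ v,
       "bash cs_7643_efficiencylane/utils/run_parallel.sh " ++ full ++ " " ++ ds ++ " " ++ cfg
         ++ " model_" ++ v)
  | .adapter short full arch cfg =>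
      (short ++ "_" ++ ds ++ "_" ++ arch ++ "_training_adapter_" ++ v,
       "bash cs_7643_efficiencylane/utils/run_parallel_adapter.sh " ++ full ++ " " ++ ds ++ " "
         ++ arch ++ " " ++ cfg ++ " adapter_" ++ v)
  | .best short full arch =>
      (short ++ "_" ++ ds ++ "_" ++ arch ++ "_training_adapter_" ++ v ++ "_best",
       "bash cs_7643_efficiencylane/utils/run_parallel_adapter.sh " ++ full ++ " " ++ ds ++ " "
         ++ arch ++ " " ++ short ++ "_" ++ ds ++ "_" ++ arch ++ " adapter_" ++ v ++ "_best")

def container_of_expected_runs_alt (dataset : String) (version : String) (parallelism : String) : List (String × String) :=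
  (((pvPlan dataset).map (fun s => pvRender s dataset version)).foldl
    (fun d kv => d.insert kv.1 (kv.2 ++ (" " ++ parallelism))) PySem.Dict.empty).items

-- ===== PRECONDITION & SPEC =====
def Spec_container_of_expected_runs (dataset : String) (version : String) (parallelism : String) (out : List (String × String)) : Prop := out = container_of_expected_runs_alt dataset version parallelism
instance (dataset : String) (version : String) (parallelism : String) (out : List (String × String)) : Decidable (Spec_container_of_expected_runs dataset version parallelism out) := by unfold Spec_container_of_expected_runs; infer_instance

-- ===== CLAIM (what is proved, stated in full; the proofs are below) =====
def Claim_equal_container_of_expected_runs : Prop := ∀ (dataset : String) (version : String) (parallelism : String), Dom_container_of_expected_runs dataset version parallelism → Spec_container_of_expected_runs dataset version parallelism (container_of_expected_runs dataset version parallelism)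

-- ===== LEMMAS AND PROOFS =====

-- fold a list of pairs into a dict by plain insertion
def pvIns (d : PySem.Dict String String) (ps : List (String × String)) : PySem.Dict String String :=
  ps.foldl (fun dd kv => dd.insert kv.1 kv.2) d

-- B's rendered entry list
def pvL (ds v : String) : List (String × String) := (pvPlan ds).map (fun s => pvRender s ds v)

lemma pv_oflist (l : List (String × String)) : PySem.Dict.ofList l = pvIns PySem.Dict.empty l := rfl

lemma pv_update_eq (d : PySem.Dict String String) (l : List (String × String)) :
    d.update l = pvIns d l := rfl

lemma pv_ins_append (d : PySem.Dict String String) (l1 l2 : List (String × String)) :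
    pvIns (pvIns d l1) l2 = pvIns d (l1 ++ l2) := (List.foldl_append).symm

-- the chemprot/rct-20k override: re-inserting k1, k2 overwrites in place
lemma pv_swap (k1 k2 k3 k4 a b c d a' b' : String)
    (h12 : k1 ≠ k2) (h13 : k1 ≠ k3) (h14 : k1 ≠ k4) (h23 : k2 ≠ k3) (h24 : k2 ≠ k4) (h34 : k3 ≠ k4) :
    pvIns PySem.Dict.empty [(k1, a), (k2, b), (k3, c), (k4, d), (k1, a'), (k2, b')]
      = pvIns PySem.Dict.empty [(k1, a'), (k2, b'), (k3, c), (k4, d)] := by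
  have h21 := h12.symm; have h31 := h13.symm; have h41 := h14.symm
  have h32 := h23.symm; have h42 := h24.symm
  apply PySem.Dict.ext
  simp [pvIns, PySem.Dict.insert, PySem.Dict.contains, PySem.Dict.empty,
    h12, h13, h14, h23, h24, h34, h21, h31, h41, h32, h42]

lemma pv_swap_cons {k1 k2 k3 k4 a b c d a' b' : String} {R : List (String × String)}
    (h12 : k1 ≠ k2) (h13 : k1 ≠ k3) (h14 : k1 ≠ k4) (h23 : k2 ≠ k3) (h24 : k2 ≠ k4) (h34 : k3 ≠ k4) :
    pvIns PySem.Dict.empty ((k1, a) :: (k2, b) :: (k3, c) :: (k4, d) :: (k1, a') :: (k2, b') :: R)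
      = pvIns PySem.Dict.empty ((k1, a') :: (k2, b') :: (k3, c) :: (k4, d) :: R) := by
  have e1 : (k1, a) :: (k2, b) :: (k3, c) :: (k4, d) :: (k1, a') :: (k2, b') :: R
      = [(k1, a), (k2, b), (k3, c), (k4, d), (k1, a'), (k2, b')] ++ R := rfl
  have e2 : (k1, a') :: (k2, b') :: (k3, c) :: (k4, d) :: R
      = [(k1, a'), (k2, b'), (k3, c), (k4, d)] ++ R := rfl
  rw [e1, e2, ← pv_ins_append, ← pv_ins_append, pv_swap k1 k2 k3 k4 a b c d a' b' h12 h13 h14 h23 h24 h34]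

-- per-dataset equality of A's dict with the fold of B's rendered plan
lemma pv_case_ci (v : String) :
    pvDictBlock4 "citation_intent" v (pvDictBlock3 "citation_intent" v
      (pvDictBlock2 "citation_intent" v (pvDictBlock1 "citation_intent" v
        (pvDictBase "citation_intent" v))))
      = pvIns PySem.Dict.empty (pvL "citation_intent" v) := by
  unfold pvDictBase pvDictBlock1 pvDictBlock2 pvDictBlock3 pvDictBlock4 pvL pvPlan pvSpecModel pvSpecAdapters pvAllen pvRB pvCS
  simp only [List.mem_cons, List.not_mem_nil, or_false, String.reduceEq, if_true, if_false,
    List.foldl_cons, List.foldl_nil, List.map_cons, List.map_nil,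
    pv_oflist, pv_update_eq, pv_ins_append, List.append_assoc, List.cons_append, List.nil_append,
    or_true, true_or, false_or, or_self, not_false_eq_true]
  apply congrArg
  simp only [List.cons.injEq, Prod.mk.injEq, ← String.toList_inj, and_true]
  simp [pvRender, String.toList_append, List.append_assoc]

lemma pv_case_sc (v : String) :
    pvDictBlock4 "sciie" v (pvDictBlock3 "sciie" v
      (pvDictBlock2 "sciie" v (pvDictBlock1 "sciie" v (pvDictBase "sciie" v))))
      = pvIns PySem.Dict.empty (pvL "sciie" v) := by
  unfold pvDictBase pvDictBlock1 pvDictBlock2 pvDictBlock3 pvDictBlock4 pvL pvPlan pvSpecModel pvSpecAdapters pvAllen pvRB pvCS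
  simp only [List.mem_cons, List.not_mem_nil, or_false, String.reduceEq, if_true, if_false,
    List.foldl_cons, List.foldl_nil, List.map_cons, List.map_nil,
    pv_oflist, pv_update_eq, pv_ins_append, List.append_assoc, List.cons_append, List.nil_append,
    or_true, true_or, false_or, or_self, not_false_eq_true]
  apply congrArg
  simp only [List.cons.injEq, Prod.mk.injEq, ← String.toList_inj, and_true]
  simp [pvRender, String.toList_append, List.append_assoc]

lemma pv_case_hp (v : String) :
    pvDictBlock4 "hyperpartisan_news" v (pvDictBlock3 "hyperpartisan_news" v
      (pvDictBlock2 "hyperpartisan_news" v (pvDictBlock1 "hyperpartisan_news" v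
        (pvDictBase "hyperpartisan_news" v))))
      = pvIns PySem.Dict.empty (pvL "hyperpartisan_news" v) := by
  unfold pvDictBase pvDictBlock1 pvDictBlock2 pvDictBlock3 pvDictBlock4 pvL pvPlan pvSpecModel pvSpecAdapters pvAllen pvRB pvCS
  simp only [List.mem_cons, List.not_mem_nil, or_false, String.reduceEq, if_true, if_false,
    List.foldl_cons, List.foldl_nil, List.map_cons, List.map_nil,
    pv_oflist, pv_update_eq, pv_ins_append, List.append_assoc, List.cons_append, List.nil_append,
    or_true, true_or, false_or, or_self, not_false_eq_true]
  apply congrArg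
  simp only [List.cons.injEq, Prod.mk.injEq, ← String.toList_inj, and_true]
  simp [pvRender, String.toList_append, List.append_assoc]

lemma pv_case_ag (v : String) :
    pvDictBlock4 "ag" v (pvDictBlock3 "ag" v
      (pvDictBlock2 "ag" v (pvDictBlock1 "ag" v (pvDictBase "ag" v))))
      = pvIns PySem.Dict.empty (pvL "ag" v) := by
  unfold pvDictBase pvDictBlock1 pvDictBlock2 pvDictBlock3 pvDictBlock4 pvL pvPlan pvSpecModel pvSpecAdapters pvAllen pvRB pvCS
  simp only [List.mem_cons, List.not_mem_nil, or_false, String.reduceEq, if_true, if_false,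
    List.foldl_cons, List.foldl_nil, List.map_cons, List.map_nil,
    pv_oflist, pv_update_eq, pv_ins_append, List.append_assoc, List.cons_append, List.nil_append,
    or_true, true_or, false_or, or_self, not_false_eq_true]
  apply congrArg
  simp only [List.cons.injEq, Prod.mk.injEq, ← String.toList_inj, and_true]
  simp [pvRender, String.toList_append, List.append_assoc]

lemma pv_case_am (v : String) :
    pvDictBlock4 "amazon" v (pvDictBlock3 "amazon" v
      (pvDictBlock2 "amazon" v (pvDictBlock1 "amazon" v (pvDictBase "amazon" v))))
      = pvIns PySem.Dict.empty (pvL "amazon" v) := by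
  unfold pvDictBase pvDictBlock1 pvDictBlock2 pvDictBlock3 pvDictBlock4 pvL pvPlan pvSpecModel pvSpecAdapters pvAllen pvRB pvCS
  simp only [List.mem_cons, List.not_mem_nil, or_false, String.reduceEq, if_true, if_false,
    List.foldl_cons, List.foldl_nil, List.map_cons, List.map_nil,
    pv_oflist, pv_update_eq, pv_ins_append, List.append_assoc, List.cons_append, List.nil_append,
    or_true, true_or, false_or, or_self, not_false_eq_true]
  apply congrArg
  simp only [List.cons.injEq, Prod.mk.injEq, ← String.toList_inj, and_true]
  simp [pvRender, String.toList_append, List.append_assoc]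

lemma pv_case_im (v : String) :
    pvDictBlock4 "imdb" v (pvDictBlock3 "imdb" v
      (pvDictBlock2 "imdb" v (pvDictBlock1 "imdb" v (pvDictBase "imdb" v))))
      = pvIns PySem.Dict.empty (pvL "imdb" v) := by
  unfold pvDictBase pvDictBlock1 pvDictBlock2 pvDictBlock3 pvDictBlock4 pvL pvPlan pvSpecModel pvSpecAdapters pvAllen pvRB pvCS
  simp only [List.mem_cons, List.not_mem_nil, or_false, String.reduceEq, if_true, if_false,
    List.foldl_cons, List.foldl_nil, List.map_cons, List.map_nil,
    pv_oflist, pv_update_eq, pv_ins_append, List.append_assoc, List.cons_append, List.nil_append,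
    or_true, true_or, false_or, or_self, not_false_eq_true]
  apply congrArg
  simp only [List.cons.injEq, Prod.mk.injEq, ← String.toList_inj, and_true]
  simp [pvRender, String.toList_append, List.append_assoc]

lemma pv_case_ch (v : String) :
    pvDictBlock4 "chemprot" v (pvDictBlock3 "chemprot" v
      (pvDictBlock2 "chemprot" v (pvDictBlock1 "chemprot" v (pvDictBase "chemprot" v))))
      = pvIns PySem.Dict.empty (pvL "chemprot" v) := by
  unfold pvDictBase pvDictBlock1 pvDictBlock2 pvDictBlock3 pvDictBlock4 pvL pvPlan pvSpecModel pvSpecAdapters pvAllen pvRB pvCS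
  simp only [List.mem_cons, List.not_mem_nil, or_false, String.reduceEq, if_true, if_false,
    List.foldl_cons, List.foldl_nil, List.map_cons, List.map_nil,
    pv_oflist, pv_update_eq, pv_ins_append, List.append_assoc, List.cons_append, List.nil_append,
    or_true, true_or, false_or, or_self, not_false_eq_true]
  rw [pv_swap_cons (by simp [← String.toList_inj, String.toList_append, List.append_assoc]) (by simp [← String.toList_inj, String.toList_append, List.append_assoc]) (by simp [← String.toList_inj, String.toList_append, List.append_assoc]) (by simp [← String.toList_inj, String.toList_append, List.append_assoc]) (by simp [← String.toList_inj, String.toList_append, List.append_assoc]) (by simp [← String.toList_inj, String.toList_append, List.append_assoc])]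
  apply congrArg
  simp only [List.cons.injEq, Prod.mk.injEq, ← String.toList_inj, and_true]
  simp [pvRender, String.toList_append, List.append_assoc]

lemma pv_case_rct (v : String) :
    pvDictBlock4 "rct-20k" v (pvDictBlock3 "rct-20k" v
      (pvDictBlock2 "rct-20k" v (pvDictBlock1 "rct-20k" v (pvDictBase "rct-20k" v))))
      = pvIns PySem.Dict.empty (pvL "rct-20k" v) := by
  unfold pvDictBase pvDictBlock1 pvDictBlock2 pvDictBlock3 pvDictBlock4 pvL pvPlan pvSpecModel pvSpecAdapters pvAllen pvRB pvCS
  simp only [List.mem_cons, List.not_mem_nil, or_false, String.reduceEq, if_true, if_false,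
    List.foldl_cons, List.foldl_nil, List.map_cons, List.map_nil,
    pv_oflist, pv_update_eq, pv_ins_append, List.append_assoc, List.cons_append, List.nil_append,
    or_true, true_or, false_or, or_self, not_false_eq_true]
  rw [pv_swap_cons (by simp [← String.toList_inj, String.toList_append, List.append_assoc]) (by simp [← String.toList_inj, String.toList_append, List.append_assoc]) (by simp [← String.toList_inj, String.toList_append, List.append_assoc]) (by simp [← String.toList_inj, String.toList_append, List.append_assoc]) (by simp [← String.toList_inj, String.toList_append, List.append_assoc]) (by simp [← String.toList_inj, String.toList_append, List.append_assoc])]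
  apply congrArg
  simp only [List.cons.injEq, Prod.mk.injEq, ← String.toList_inj, and_true]
  simp [pvRender, String.toList_append, List.append_assoc]

lemma pv_case_default (ds v : String)
    (h1 : ds ≠ "citation_intent") (h2 : ds ≠ "sciie") (h3 : ds ≠ "hyperpartisan_news")
    (h4 : ds ≠ "ag") (h5 : ds ≠ "amazon") (h6 : ds ≠ "imdb") (h7 : ds ≠ "chemprot")
    (h8 : ds ≠ "rct-20k") :
    pvDictBlock4 ds v (pvDictBlock3 ds v
      (pvDictBlock2 ds v (pvDictBlock1 ds v (pvDictBase ds v))))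
      = pvIns PySem.Dict.empty (pvL ds v) := by
  unfold pvDictBase pvDictBlock1 pvDictBlock2 pvDictBlock3 pvDictBlock4 pvL pvPlan
  rw [if_neg (by simp [h1, h2, h3, h4, h5, h6, h7, h8]),
      if_neg (by simp [h1, h2, h3, h4, h5, h6, h7, h8]),
      if_neg (by simp [h1, h2, h3, h4, h5, h6, h7, h8]),
      if_neg (by simp [h1, h2, h3, h4, h5, h6, h7, h8]),
      if_neg (by simp [h1, h2, h3, h4, h5, h6, h7, h8]),
      if_neg (by simp [h1, h2, h3, h4, h5, h6, h7, h8]),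
      if_neg (by simp [h1, h2, h3, h4, h5, h6, h7, h8]),
      if_neg (by simp [h1, h2, h3, h4, h5, h6, h7, h8]), pv_oflist]
  apply congrArg
  simp only [pvSpecAdapters, pvRB, pvRender, List.map_cons, List.map_nil]
  simp only [List.cons.injEq, Prod.mk.injEq, ← String.toList_inj, and_true]
  simp [pvRender, String.toList_append, List.append_assoc]

lemma pv_main (ds v : String) :
    pvDictBlock4 ds v (pvDictBlock3 ds v
      (pvDictBlock2 ds v (pvDictBlock1 ds v (pvDictBase ds v))))
      = pvIns PySem.Dict.empty (pvL ds v) := by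
  by_cases h1 : ds = "citation_intent"; · exact h1 ▸ pv_case_ci v
  by_cases h2 : ds = "sciie"; · exact h2 ▸ pv_case_sc v
  by_cases h3 : ds = "hyperpartisan_news"; · exact h3 ▸ pv_case_hp v
  by_cases h4 : ds = "ag"; · exact h4 ▸ pv_case_ag v
  by_cases h5 : ds = "amazon"; · exact h5 ▸ pv_case_am v
  by_cases h6 : ds = "imdb"; · exact h6 ▸ pv_case_im v
  by_cases h7 : ds = "chemprot"; · exact h7 ▸ pv_case_ch v
  by_cases h8 : ds = "rct-20k"; · exact h8 ▸ pv_case_rct v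
  exact pv_case_default ds v h1 h2 h3 h4 h5 h6 h7 h8

-- inserting with values already suffixed = suffixing the values of the inserted dict
lemma pv_insert_map_val (s : String) (d : PySem.Dict String String) (k v : String) :
    (PySem.Dict.mk (d.items.map (fun kv => (kv.1, kv.2 ++ s)))).insert k (v ++ s)
      = PySem.Dict.mk ((d.insert k v).items.map (fun kv => (kv.1, kv.2 ++ s))) := by
  have hc : (PySem.Dict.mk (d.items.map (fun kv => (kv.1, kv.2 ++ s)))).contains k = d.contains k := by
    simp [PySem.Dict.contains, List.any_map, Function.comp_def]
  by_cases h : d.contains k = true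
  · apply PySem.Dict.ext
    rw [PySem.Dict.items_insert_of_contains _ _ (hc.trans h),
        PySem.Dict.items_insert_of_contains d v h]
    simp only [List.map_map]
    refine List.map_congr_left (fun p _ => ?_)
    by_cases hpk : p.1 = k <;> simp [hpk]
  · apply PySem.Dict.ext
    rw [PySem.Dict.items_insert_of_not_contains _ _ (by rw [hc]; exact Bool.eq_false_iff.mpr h),
        PySem.Dict.items_insert_of_not_contains d v (Bool.eq_false_iff.mpr h)]
    simp

lemma pv_foldl_insert_append (s : String) :
    ∀ (entries : List (String × String)) (d : PySem.Dict String String),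
      (entries.foldl (fun dd kv => dd.insert kv.1 (kv.2 ++ s))
          (PySem.Dict.mk (d.items.map (fun kv => (kv.1, kv.2 ++ s))))).items
        = ((entries.foldl (fun dd kv => dd.insert kv.1 kv.2) d).items).map (fun kv => (kv.1, kv.2 ++ s))
  | [], d => rfl
  | kv :: es, d => by
      simp only [List.foldl_cons]
      rw [pv_insert_map_val s d kv.1 kv.2]
      exact pv_foldl_insert_append s es (d.insert kv.1 kv.2)

lemma pv_foldl_insert_append_empty (s : String) (entries : List (String × String)) :
    (entries.foldl (fun dd kv => dd.insert kv.1 (kv.2 ++ s)) PySem.Dict.empty).items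
      = ((entries.foldl (fun dd kv => dd.insert kv.1 kv.2) PySem.Dict.empty).items).map (fun kv => (kv.1, kv.2 ++ s)) :=
  pv_foldl_insert_append s entries PySem.Dict.empty

-- A's rewrite loop over the keys suffixes each present key's value once
lemma pv_modify_keys_loop (s : String) :
    ∀ (ks : List String) (d : PySem.Dict String String), d.keys.Nodup → ks.Nodup →
      (∀ k ∈ ks, k ∈ d.keys) →
      (ks.foldl (fun dd k => dd.modify k "" (fun c => c ++ s)) d).items
        = d.items.map (fun kv => if kv.1 ∈ ks then (kv.1, kv.2 ++ s) else kv)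
  | [], d, _, _, _ => by simp
  | k :: ks, d, hd, hks, hsub => by
      have hk : k ∈ d.keys := hsub k (List.mem_cons_self)
      have hc : d.contains k = true := (PySem.Dict.contains_iff_mem_keys d k).2 hk
      have hknotks : k ∉ ks := (List.nodup_cons.1 hks).1
      have hitems : (d.modify k "" (fun c => c ++ s)).items
          = d.items.map (fun p => if (p.1 == k) = true then (k, d.getD k "" ++ s) else p) := by
        unfold PySem.Dict.modify
        exact PySem.Dict.items_insert_of_contains d _ hc
      have hkeys : (d.modify k "" (fun c => c ++ s)).keys = d.keys := by
        rw [PySem.Dict.keys_modify, PySem.Dict.keys_insert_of_contains _ _ hc]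
      rw [List.foldl_cons,
          pv_modify_keys_loop s ks (d.modify k "" (fun c => c ++ s))
            (hkeys ▸ hd) ((List.nodup_cons.1 hks).2)
            (fun x hx => hkeys ▸ hsub x (List.mem_cons_of_mem _ hx)),
          hitems, List.map_map]
      refine List.map_congr_left (fun p hp => ?_)
      by_cases hpk : p.1 = k
      · have hmem : (k, p.2) ∈ d.items := by
          have hpe : p = (k, p.2) := by cases p; simp_all
          exact hpe ▸ hp
        have hgd : d.getD k "" = p.2 := PySem.Dict.getD_of_mem_items d hmem hd ""
        simp [hpk, hgd, hknotks]
      · simp [hpk, List.mem_cons]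

lemma pv_modify_loop_items (s : String) (d : PySem.Dict String String) (hd : d.keys.Nodup) :
    (d.items.foldl (fun dd kv => dd.modify kv.1 "" (fun c => c ++ s)) d).items
      = d.items.map (fun kv => (kv.1, kv.2 ++ s)) := by
  have h1 : d.items.foldl (fun dd kv => dd.modify kv.1 "" (fun c => c ++ s)) d
      = d.keys.foldl (fun dd k => dd.modify k "" (fun c => c ++ s)) d := by
    rw [show d.keys = d.items.map (fun x => x.1) from rfl, List.foldl_map]
  rw [h1, pv_modify_keys_loop s d.keys d hd hd (fun k hk => hk)]
  exact List.map_congr_left (fun p hp => by simp [PySem.Dict.mem_keys_of_mem_items d hp])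

lemma pv_L_nodup (ds v : String) :
    (pvIns PySem.Dict.empty (pvL ds v)).keys.Nodup :=
  PySem.Dict.nodup_keys_foldl_insert_key (pvL ds v) (fun kv => kv.1)
    (fun _ kv => kv.2) PySem.Dict.empty (by simp [PySem.Dict.keys, PySem.Dict.empty])

-- ===== VERDICT (by name: the statement is the Claim_ definition above) =====
theorem container_of_expected_runs_spec : Claim_equal_container_of_expected_runs := by
  intro dataset version parallelism _
  unfold Spec_container_of_expected_runs container_of_expected_runs container_of_expected_runs_alt
  rw [pv_main]
  unfold pvAppendParallelism
  rw [pv_modify_loop_items (" " ++ parallelism) _ (pv_L_nodup dataset version),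
      pv_foldl_insert_append_empty]
  rfl
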